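-- pv_equiv track=rewrite | github.com/scikit-hep/awkward | dev/pytocuda.py | gettemplateargs
-- ===== SOURCE A (Python) =====
-- def gettemplateargs(spec):
--     templateargs = {}
--     if "specializations" in spec.keys():
--         typelist = []
--         count = 0
--         for childfunc in spec["specializations"]:
--             for i in range(len(childfunc["args"])):
--                 if len(typelist) < i + 1:
--                     typelist.append(list(childfunc["args"][i].values())[0])
--                 else:
--                     if typelist[i] != list(childfunc["args"][i].values())[0]:
--                         if count == 0:
--                             templateargs[list(childfunc["args"][i].keys())[0]] = "T"
--                             count += 1
--                         else:
--                             templateargs[list(childfunc["args"][i].keys())[0]] = "C"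
--     return templateargs
-- ===== SOURCE B (Python) =====
-- def gettemplateargs(spec):
--     templateargs = {}
--     if "specializations" in spec:
--         # pass 1: reference type per position = value from the first specialization reaching it
--         typelist = []
--         for childfunc in spec["specializations"]:
--             for i, arg in enumerate(childfunc["args"]):
--                 if i >= len(typelist):
--                     typelist.append(list(arg.values())[0])
--         # pass 2: mark every arg whose type differs from the reference ('T' first, 'C' after)
--         first = True
--         for childfunc in spec["specializations"]:
--             for i, arg in enumerate(childfunc["args"]):
--                 if list(arg.values())[0] != typelist[i]:
--                     templateargs[list(arg.keys())[0]] = "T" if first else "C"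
--                     first = False
--     return templateargs
-- ===== Notes on version B (the rewrite author's own statement) =====
-- stated objective: simpler
-- what changed: A's single stateful pass that grows the reference type table while simultaneously detecting mismatches (and counts to pick 'T' vs 'C') is split into two plain passes: pass 1 builds the per-position reference table from the first specialization reaching each position, pass 2 rescans in the same order and marks every mismatching arg ('T' for the first mismatch, 'C' afterwards, tracked by a boolean).
import Mathlib
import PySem

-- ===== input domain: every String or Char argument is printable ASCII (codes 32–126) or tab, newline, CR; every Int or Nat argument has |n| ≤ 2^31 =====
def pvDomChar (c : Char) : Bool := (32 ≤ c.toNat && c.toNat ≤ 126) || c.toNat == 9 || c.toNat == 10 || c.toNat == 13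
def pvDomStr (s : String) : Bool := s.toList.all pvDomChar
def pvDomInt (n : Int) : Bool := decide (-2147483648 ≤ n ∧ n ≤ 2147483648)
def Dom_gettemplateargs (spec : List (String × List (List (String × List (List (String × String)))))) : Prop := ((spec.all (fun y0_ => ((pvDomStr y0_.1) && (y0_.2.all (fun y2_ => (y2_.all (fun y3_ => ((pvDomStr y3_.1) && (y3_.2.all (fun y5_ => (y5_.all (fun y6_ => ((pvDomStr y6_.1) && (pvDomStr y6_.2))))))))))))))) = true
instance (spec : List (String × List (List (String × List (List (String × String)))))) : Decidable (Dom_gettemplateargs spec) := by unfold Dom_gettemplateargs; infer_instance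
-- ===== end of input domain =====

-- B replaces A's single stateful detect-while-building pass by two plain passes (build the
-- per-position reference table, then mark mismatches); objective: simpler decomposition, same cost.

-- shared transliterations of the Python sub-expressions both versions use:
-- list(arg.values())[0], list(arg.keys())[0], childfunc["args"]
def vOf (arg : List (String × String)) : String := ((PySem.Dict.mk arg).values).headD ""
def kOf (arg : List (String × String)) : String := ((PySem.Dict.mk arg).keys).headD ""
def pvArgsOf (cf : List (String × List (List (String × String)))) : List (List (String × String)) :=
  (PySem.Dict.mk cf).getD "args" []

-- ===== PORT A =====
-- inner loop of A: 'for i in range(len(childfunc["args"]))' with state (templateargs, typelist, count);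
-- Pre_ excludes arg = {} (Python IndexError) so headD's default is never taken on admitted inputs
def pvLoopA (args : List (List (String × String))) (i : Nat)
    (ta : PySem.Dict String String) (tl : List String) (cnt : Nat) :
    PySem.Dict String String × List String × Nat :=
  match args with
  | [] => (ta, tl, cnt)
  | arg :: rest =>
    if tl.length < i + 1 then
      pvLoopA rest (i+1) ta (tl ++ [vOf arg]) cnt
    else if tl.getD i "" ≠ vOf arg then
      if cnt = 0 then
        pvLoopA rest (i+1) (ta.insert (kOf arg) "T") tl (cnt+1)
      else
        pvLoopA rest (i+1) (ta.insert (kOf arg) "C") tl cnt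
    else
      pvLoopA rest (i+1) ta tl cnt

def gettemplateargs (spec : List (String × List (List (String × List (List (String × String)))))) : List (String × String) :=
  let templateargs : PySem.Dict String String := PySem.Dict.empty
  let d := PySem.Dict.mk spec
  if d.contains "specializations" then
    let st := (d.getD "specializations" []).foldl
      (fun st cf => pvLoopA (pvArgsOf cf) 0 st.1 st.2.1 st.2.2)
      (templateargs, ([] : List String), (0 : Nat))
    st.1.items
  else
    templateargs.items

-- ===== PORT B =====
-- pass 1 inner loop: grow the reference type table
def pvLoop1 (args : List (List (String × String))) (i : Nat) (tl : List String) : List String :=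
  match args with
  | [] => tl
  | arg :: rest =>
    if tl.length ≤ i then
      pvLoop1 rest (i+1) (tl ++ [vOf arg])
    else
      pvLoop1 rest (i+1) tl

-- pass 2 inner loop: mark mismatches against the finished table
def pvLoop2 (tlF : List String) (args : List (List (String × String))) (i : Nat)
    (ta : PySem.Dict String String) (first : Bool) : PySem.Dict String String × Bool :=
  match args with
  | [] => (ta, first)
  | arg :: rest =>
    if vOf arg ≠ tlF.getD i "" then
      pvLoop2 tlF rest (i+1) (ta.insert (kOf arg) (if first then "T" else "C")) false
    else
      pvLoop2 tlF rest (i+1) ta first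

def gettemplateargs_alt (spec : List (String × List (List (String × List (List (String × String)))))) : List (String × String) :=
  let d := PySem.Dict.mk spec
  if d.contains "specializations" then
    let cfs := d.getD "specializations" []
    let tlF := cfs.foldl (fun tl cf => pvLoop1 (pvArgsOf cf) 0 tl) []
    let st := cfs.foldl (fun st cf => pvLoop2 tlF (pvArgsOf cf) 0 st.1 st.2)
      ((PySem.Dict.empty : PySem.Dict String String), true)
    st.1.items
  else
    []

-- ===== PRECONDITION & SPEC =====
-- Pre_ excludes exactly the inputs where Python A raises: a specialization without an "args" key
-- (KeyError) or an empty argument dict (IndexError on list(arg.values())[0]).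
def Pre_gettemplateargs (spec : List (String × List (List (String × List (List (String × String)))))) : Prop :=
  ∀ cf ∈ (PySem.Dict.mk spec).getD "specializations" [],
    (PySem.Dict.mk cf).contains "args" = true ∧
    ∀ arg ∈ (PySem.Dict.mk cf).getD "args" [], arg ≠ []
instance (spec : List (String × List (List (String × List (List (String × String)))))) : Decidable (Pre_gettemplateargs spec) := by unfold Pre_gettemplateargs; infer_instance

def pvWitness_gettemplateargs : (List (String × List (List (String × List (List (String × String)))))) :=
  [("specializations",
    [[("args", [[("x", "int")], [("y", "float")]])],
     [("args", [[("x", "int")], [("y", "double")]])]])]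

def Spec_gettemplateargs (spec : List (String × List (List (String × List (List (String × String)))))) (out : List (String × String)) : Prop := out = gettemplateargs_alt spec
instance (spec : List (String × List (List (String × List (List (String × String)))))) (out : List (String × String)) : Decidable (Spec_gettemplateargs spec out) := by unfold Spec_gettemplateargs; infer_instance

-- ===== CLAIM (what is proved, stated in full; the proofs are below) =====
def Claim_equal_gettemplateargs : Prop := ∀ (spec : List (String × List (List (String × List (List (String × String)))))), Dom_gettemplateargs spec → Pre_gettemplateargs spec → Spec_gettemplateargs spec (gettemplateargs spec)

-- ===== LEMMAS AND PROOFS =====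

-- pass 1 only appends to the table
theorem pvLoop1_prefix (args : List (List (String × String))) :
    ∀ i tl, tl <+: pvLoop1 args i tl := by
  induction args with
  | nil => intro i tl; simp [pvLoop1]
  | cons arg rest ih =>
    intro i tl
    simp only [pvLoop1]
    split
    · exact (List.prefix_append tl _).trans (ih (i+1) (tl ++ [vOf arg]))
    · exact ih (i+1) tl

theorem pvPass1_prefix (cfs : List (List (String × List (List (String × String))))) :
    ∀ tl, tl <+: cfs.foldl (fun tl cf => pvLoop1 (pvArgsOf cf) 0 tl) tl := by
  induction cfs with
  | nil => intro tl; simp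
  | cons cf rest ih =>
    intro tl
    exact (pvLoop1_prefix _ 0 tl).trans (ih _)

theorem pvGetD_prefix {l1 l2 : List String} (h : l1 <+: l2) {i : Nat} (hi : i < l1.length) (d : String) :
    l2.getD i d = l1.getD i d := by
  obtain ⟨t, rfl⟩ := h
  simp [List.getD, List.getElem?_append_left hi]

-- the inner loops agree: A's combined step equals pass1 + pass2 against any table tlF
-- extending pass1's result, with A's count and B's 'first' flag related by cnt = 0 ↔ first
theorem pvInner_eq (args : List (List (String × String))) :
    ∀ i tl (ta : PySem.Dict String String) cnt first tlF,
      pvLoop1 args i tl <+: tlF → (cnt = 0 ↔ first = true) → i ≤ tl.length →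
      (pvLoopA args i ta tl cnt).1 = (pvLoop2 tlF args i ta first).1 ∧
      (pvLoopA args i ta tl cnt).2.1 = pvLoop1 args i tl ∧
      ((pvLoopA args i ta tl cnt).2.2 = 0 ↔ (pvLoop2 tlF args i ta first).2 = true) := by
  induction args with
  | nil => intro i tl ta cnt first tlF _ hcf _; simpa [pvLoopA, pvLoop1, pvLoop2] using hcf
  | cons arg rest ih =>
    intro i tl ta cnt first tlF hpre hcf hlen
    by_cases h1 : tl.length < i + 1
    · -- append branch: tl.length = i, table gets vOf arg, B sees no mismatch
      have hil : tl.length = i := by omega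
      have hloop1 : pvLoop1 (arg :: rest) i tl = pvLoop1 rest (i+1) (tl ++ [vOf arg]) := by
        simp only [pvLoop1]; rw [if_pos (by omega)]
      have hprefix : (tl ++ [vOf arg]) <+: tlF :=
        (pvLoop1_prefix rest (i+1) (tl ++ [vOf arg])).trans (hloop1 ▸ hpre)
      have hget : tlF.getD i "" = vOf arg := by
        have h := pvGetD_prefix hprefix (i := i) (by simp [hil]) ""
        rw [h, ← hil, List.getD, List.getElem?_append_right (Nat.le_refl tl.length)]
        simp
      have hA : pvLoopA (arg :: rest) i ta tl cnt = pvLoopA rest (i+1) ta (tl ++ [vOf arg]) cnt := by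
        simp only [pvLoopA]; rw [if_pos h1]
      have hB : pvLoop2 tlF (arg :: rest) i ta first = pvLoop2 tlF rest (i+1) ta first := by
        simp only [pvLoop2]; rw [if_neg (fun hcon => hcon hget.symm)]
      rw [hA, hB, hloop1]
      exact ih (i+1) (tl ++ [vOf arg]) ta cnt first tlF (hloop1 ▸ hpre) hcf
        (by rw [List.length_append]; simp; omega)
    · -- table already covers i
      have hi : i < tl.length := by omega
      have hloop1 : pvLoop1 (arg :: rest) i tl = pvLoop1 rest (i+1) tl := by
        simp only [pvLoop1]; rw [if_neg (by omega)]
      have hget : tlF.getD i "" = tl.getD i "" :=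
        pvGetD_prefix ((pvLoop1_prefix rest (i+1) tl).trans (hloop1 ▸ hpre)) hi ""
      by_cases hne : tl.getD i "" ≠ vOf arg
      · -- mismatch: A inserts "T"/"C" on cnt, B on 'first'; both advance the flag
        have hB : pvLoop2 tlF (arg :: rest) i ta first =
            pvLoop2 tlF rest (i+1) (ta.insert (kOf arg) (if first then "T" else "C")) false := by
          simp only [pvLoop2]
          rw [if_pos (fun he => hne (by rw [← hget, ← he]))]
        by_cases hc : cnt = 0
        · have hf : first = true := hcf.mp hc
          have hA : pvLoopA (arg :: rest) i ta tl cnt =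
              pvLoopA rest (i+1) (ta.insert (kOf arg) "T") tl (cnt+1) := by
            simp only [pvLoopA]; rw [if_neg h1, if_pos hne, if_pos hc]
          rw [hA, hB, hloop1, hf]
          exact ih (i+1) tl _ (cnt+1) false tlF (hloop1 ▸ hpre) (by simp) (by omega)
        · have hf : first = false := by
            cases first with
            | true => exact absurd (hcf.mpr rfl) hc
            | false => rfl
          have hA : pvLoopA (arg :: rest) i ta tl cnt =
              pvLoopA rest (i+1) (ta.insert (kOf arg) "C") tl cnt := by
            simp only [pvLoopA]; rw [if_neg h1, if_pos hne, if_neg hc]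
          rw [hA, hB, hloop1, hf]
          exact ih (i+1) tl _ cnt false tlF (hloop1 ▸ hpre) (by simp [hc]) (by omega)
      · -- match: both recurse unchanged
        rw [not_not] at hne
        have hA : pvLoopA (arg :: rest) i ta tl cnt = pvLoopA rest (i+1) ta tl cnt := by
          simp only [pvLoopA]; rw [if_neg h1, if_neg (fun hcon => hcon hne)]
        have hB : pvLoop2 tlF (arg :: rest) i ta first = pvLoop2 tlF rest (i+1) ta first := by
          simp only [pvLoop2]
          rw [if_neg (fun hcon => hcon ((hget.trans hne).symm))]
        rw [hA, hB, hloop1]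
        exact ih (i+1) tl ta cnt first tlF (hloop1 ▸ hpre) hcf (by omega)

-- the outer folds agree
theorem pvOuter_eq (cfs : List (List (String × List (List (String × String))))) :
    ∀ tl (ta : PySem.Dict String String) cnt first tlF,
      cfs.foldl (fun tl cf => pvLoop1 (pvArgsOf cf) 0 tl) tl <+: tlF →
      (cnt = 0 ↔ first = true) →
      (cfs.foldl (fun st cf => pvLoopA (pvArgsOf cf) 0 st.1 st.2.1 st.2.2) (ta, tl, cnt)).1 =
        (cfs.foldl (fun st cf => pvLoop2 tlF (pvArgsOf cf) 0 st.1 st.2) (ta, first)).1 := by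
  induction cfs with
  | nil => intro tl ta cnt first tlF _ _; simp
  | cons cf rest ih =>
    intro tl ta cnt first tlF hpre hcf
    have hpre1 : pvLoop1 (pvArgsOf cf) 0 tl <+: tlF :=
      (pvPass1_prefix rest _).trans hpre
    obtain ⟨h1, h2, h3⟩ :=
      pvInner_eq (pvArgsOf cf) 0 tl ta cnt first tlF hpre1 hcf (Nat.zero_le _)
    have hrw : pvLoopA (pvArgsOf cf) 0 ta tl cnt =
        ((pvLoop2 tlF (pvArgsOf cf) 0 ta first).1, pvLoop1 (pvArgsOf cf) 0 tl,
          (pvLoopA (pvArgsOf cf) 0 ta tl cnt).2.2) :=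
      Prod.ext h1 (Prod.ext h2 rfl)
    simp only [List.foldl_cons]
    rw [hrw]
    exact ih _ _ _ _ tlF hpre h3

-- ===== VERDICT (by name: the statement is the Claim_ definition above) =====
theorem gettemplateargs_spec : Claim_equal_gettemplateargs := by
  intro spec _ _
  unfold Spec_gettemplateargs gettemplateargs gettemplateargs_alt
  by_cases hc : (PySem.Dict.mk spec).contains "specializations" = true
  · rw [if_pos hc, if_pos hc]
    exact congrArg PySem.Dict.items
      (pvOuter_eq _ [] PySem.Dict.empty 0 true _ (List.prefix_refl _) (by simp))
  · rw [if_neg hc, if_neg hc]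
    rfl
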